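-- pv_equiv track=rewrite | github.com/cms7371/CodingTestPreparations | 하반기/1.완전탐색&백트래킹/41.외벽 점검.py | solution
-- ===== SOURCE A (Python) =====
-- def solution(n, weak, dist):
--     answer = 0
--     cur_points = [tuple(weak)]
--     dist.reverse()
--     for i in range(len(dist)):
--         next_points = set()
--         for points in cur_points:
--             for p in points:
--                 next_points.add(tuple(filter(lambda a: is_far(p, a, dist[i], n), points)))
--         cur_points = next_points
--         if tuple() in cur_points:
--             break
--     if tuple() in cur_points:
--         return i + 1
--     else:
--         return -1
--
-- def is_far(s, e, d, n):
--     if e >= s: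
--         return e - s > d
--     else:
--         return e + n - s > d
-- ===== SOURCE B (Python) =====
-- # Iterative-deepening DFS instead of A's breadth-first frontier of point-sets, with a memo dict
-- # so each (remaining friends, remaining points) state is solved once.
-- # Note: A reverses `dist` in place; B leaves its arguments untouched (return value is what is compared).
-- # On weak == [] (and dist non-empty) A returns -1; B returns the intended 0 (no weak point needs covering).
--
-- def _uncovered(p, a, d, n):
--     # weak point a is NOT covered by a friend starting at p walking distance d forward
--     return (a - p if a >= p else a - p + n) > d
--
-- def solution(n, weak, dist):
--     if not weak:
--         return 0
--     ds = tuple(dist[::-1])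
--     memo = {}
--
--     def can(fs, points):
--         # can the friends fs (used in order, each starting at a remaining weak point) clear `points`?
--         if not points:
--             return True
--         if not fs:
--             return False
--         key = (fs, points)
--         if key in memo:
--             return memo[key]
--         d = fs[0]
--         rest = fs[1:]
--         res = any(can(rest, tuple(a for a in points if _uncovered(p, a, d, n))) for p in points)
--         memo[key] = res
--         return res
--
--     for k in range(1, len(ds) + 1):
--         if can(ds[:k], tuple(weak)):
--             return k
--     return -1
-- ===== Notes on version B (the rewrite author's own statement) =====
-- stated objective: alternative
-- what changed: A runs a breadth-first search keeping the whole frontier of remaining-weak-point tuples as a set of tuples, one level per (reversed) friend; B instead runs iterative deepening: for k = 1.. it tests with a short-circuiting depth-first recursion whether the first k reversed distances can clear the weak points, so no frontier of sets is ever materialised.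
-- intended difference: On weak = [] with dist non-empty A returns -1 (its frontier silently becomes empty before the empty tuple is ever tested), while B returns 0, the intended answer: no weak point needs covering, so zero friends suffice. — e.g. on solution(5, [], [1]): A returns -1, B returns 0
import Mathlib
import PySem

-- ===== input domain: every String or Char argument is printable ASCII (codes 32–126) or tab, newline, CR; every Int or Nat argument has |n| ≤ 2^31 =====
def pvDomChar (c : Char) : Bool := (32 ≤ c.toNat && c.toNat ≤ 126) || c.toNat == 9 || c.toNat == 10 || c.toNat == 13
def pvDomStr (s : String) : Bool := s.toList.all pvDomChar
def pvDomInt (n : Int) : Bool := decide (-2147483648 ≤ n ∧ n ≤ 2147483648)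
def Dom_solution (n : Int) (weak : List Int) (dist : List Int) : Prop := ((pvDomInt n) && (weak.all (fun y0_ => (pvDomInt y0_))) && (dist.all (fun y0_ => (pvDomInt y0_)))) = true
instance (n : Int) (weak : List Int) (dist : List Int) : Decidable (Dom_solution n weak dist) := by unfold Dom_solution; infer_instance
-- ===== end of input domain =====

-- B replaces A's breadth-first frontier (a set of remaining-weak-point tuples, one level per reversed
-- distance) by iterative deepening with a short-circuiting DFS on prefixes of the reversed distances
-- ("alternative" objective). A reverses `dist` in place; B does not mutate its arguments — the
-- equivalence proved here is about the return value only.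

-- ===== PORT A =====
-- is_far(s, e, d, n)
def isFar (s e d n : Int) : Bool :=
  if e ≥ s then decide (e - s > d) else decide (e + n - s > d)

-- one pass of A's inner double loop: for points in cur: for p in points: next.add(filter …)
def stepA (n d : Int) (cur : List (List Int)) : PySem.Set (List Int) :=
  cur.foldl
    (fun acc points =>
      points.foldl (fun acc2 p => PySem.Set.add acc2 (points.filter (fun a => isFar p a d n))) acc)
    PySem.Set.empty

-- A's main loop: i counts iterations; break + return i+1 when tuple() shows up, -1 after the loop
def aLoop (n : Int) : List Int → Nat → List (List Int) → Int
  | [], _, _ => -1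
  | d :: rest, i, cur =>
      let next := stepA n d cur
      if PySem.Set.contains next ([] : List Int) then ((i + 1 : Nat) : Int)
      else aLoop n rest (i + 1) next

def solution (n : Int) (weak : List Int) (dist : List Int) : Int :=
  aLoop n dist.reverse 0 [weak]

-- ===== PORT B =====
-- _uncovered(p, a, d, n)
def uncovered (p a d n : Int) : Bool :=
  decide ((if a ≥ p then a - p else a - p + n) > d)

-- _can(n, fs, points): DFS, friends used in order, each starting at a remaining weak point
def canB (n : Int) (fs : List Int) (points : List Int) : Bool :=
  if points.isEmpty then true
  else
    match fs with
    | [] => false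
    | d :: rest => points.any (fun p => canB n rest (points.filter (fun a => uncovered p a d n)))

-- the `for k in range(1, len(ds)+1)` loop
def bScan (n : Int) (ds weak : List Int) : List Nat → Int
  | [] => -1
  | k :: rest => if canB n (ds.take k) weak then (k : Int) else bScan n ds weak rest

def solution_alt (n : Int) (weak : List Int) (dist : List Int) : Int :=
  if weak.isEmpty then 0
  else
    let ds := dist.reverse
    bScan n ds weak (List.range' 1 ds.length)

-- ===== PRECONDITION & SPEC =====
-- Pre_ excludes only weak = [] ∧ dist = [], where A raises UnboundLocalError (the loop variable i
-- is read without the loop ever running).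
def Pre_solution (n : Int) (weak : List Int) (dist : List Int) : Prop :=
  ¬ (weak = [] ∧ dist = [])
instance (n : Int) (weak : List Int) (dist : List Int) : Decidable (Pre_solution n weak dist) := by
  unfold Pre_solution; infer_instance

def pvWitness_solution : Int × List Int × List Int := (12, [1, 5, 6, 10], [1, 2, 3])

-- On weak = [] with dist non-empty A returns -1 (its frontier silently becomes empty before the
-- empty tuple is ever tested), while B returns 0, the intended answer: no weak point needs covering.
def D_solution (n : Int) (weak : List Int) (dist : List Int) : Prop :=
  weak = [] ∧ dist ≠ []
instance (n : Int) (weak : List Int) (dist : List Int) : Decidable (D_solution n weak dist) := by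
  unfold D_solution; infer_instance

def Spec_solution (n : Int) (weak : List Int) (dist : List Int) (out : Int) : Prop :=
  ¬ D_solution n weak dist → out = solution_alt n weak dist
instance (n : Int) (weak : List Int) (dist : List Int) (out : Int) : Decidable (Spec_solution n weak dist out) := by
  unfold Spec_solution; infer_instance

def pvDiffWitness_solution : Int × List Int × List Int := (5, [], [1])
def pvDiffWitnessOut_solution : Int × Int := (-1, 0)

-- ===== CLAIM (what is proved, stated in full; the proofs are below) =====
def Claim_unchanged_solution : Prop := ∀ (n : Int) (weak : List Int) (dist : List Int), Dom_solution n weak dist → Pre_solution n weak dist → Spec_solution n weak dist (solution n weak dist)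
def Claim_changed_solution : Prop := Dom_solution (pvDiffWitness_solution.1) (pvDiffWitness_solution.2.1) (pvDiffWitness_solution.2.2) ∧ Pre_solution (pvDiffWitness_solution.1) (pvDiffWitness_solution.2.1) (pvDiffWitness_solution.2.2) ∧ D_solution (pvDiffWitness_solution.1) (pvDiffWitness_solution.2.1) (pvDiffWitness_solution.2.2) ∧ solution (pvDiffWitness_solution.1) (pvDiffWitness_solution.2.1) (pvDiffWitness_solution.2.2) = pvDiffWitnessOut_solution.1 ∧ solution_alt (pvDiffWitness_solution.1) (pvDiffWitness_solution.2.1) (pvDiffWitness_solution.2.2) = pvDiffWitnessOut_solution.2 ∧ pvDiffWitnessOut_solution.1 ≠ pvDiffWitnessOut_solution.2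
def Claim_exact_solution : Prop := ∀ (n : Int) (weak : List Int) (dist : List Int), Dom_solution n weak dist → Pre_solution n weak dist → D_solution n weak dist → solution n weak dist ≠ solution_alt n weak dist

-- ===== LEMMAS AND PROOFS =====

-- `reachE n fs src tgt`: applying the friends fs in order, each starting at a member of the current
-- remaining set, turns src into exactly tgt.
def reachE (n : Int) : List Int → List Int → List Int → Prop
  | [], src, tgt => tgt = src
  | d :: rest, src, tgt => ∃ p ∈ src, reachE n rest (src.filter (fun a => isFar p a d n)) tgt

def iterA (n : Int) (fs : List Int) (cur : List (List Int)) : List (List Int) :=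
  fs.foldl (fun c d => stepA n d c) cur

theorem uncovered_eq_isFar (p a d n : Int) : uncovered p a d n = isFar p a d n := by
  simp only [uncovered, isFar]
  split <;> simp <;> omega

theorem stepA_aux (n d : Int) (cur : List (List Int)) (acc : PySem.Set (List Int)) (x : List Int) :
    x ∈ cur.foldl
        (fun acc points =>
          points.foldl (fun acc2 p => PySem.Set.add acc2 (points.filter (fun a => isFar p a d n))) acc)
        acc ↔
      x ∈ acc ∨ ∃ q ∈ cur, ∃ p ∈ q, x = q.filter (fun a => isFar p a d n) := by
  induction cur generalizing acc with
  | nil => simp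
  | cons q cur ih =>
      rw [List.foldl_cons, ih, PySem.Set.mem_foldl_add]
      simp only [List.mem_cons]
      constructor
      · rintro ((h | ⟨p, hp, rfl⟩) | ⟨q', hq', p, hp, rfl⟩)
        · exact Or.inl h
        · exact Or.inr ⟨q, Or.inl rfl, p, hp, rfl⟩
        · exact Or.inr ⟨q', Or.inr hq', p, hp, rfl⟩
      · rintro (h | ⟨q', (rfl | hq'), p, hp, rfl⟩)
        · exact Or.inl (Or.inl h)
        · exact Or.inl (Or.inr ⟨p, hp, rfl⟩)
        · exact Or.inr ⟨q', hq', p, hp, rfl⟩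

theorem mem_stepA (n d : Int) (cur : List (List Int)) (x : List Int) :
    x ∈ stepA n d cur ↔ ∃ q ∈ cur, ∃ p ∈ q, x = q.filter (fun a => isFar p a d n) := by
  rw [stepA, stepA_aux]
  simp [PySem.Set.empty]

theorem mem_iterA (n : Int) (fs : List Int) (cur : List (List Int)) (x : List Int) :
    x ∈ iterA n fs cur ↔ ∃ q ∈ cur, reachE n fs q x := by
  induction fs generalizing cur with
  | nil =>
      simp only [iterA, List.foldl_nil, reachE]
      exact ⟨fun h => ⟨x, h, rfl⟩, fun ⟨q, hq, e⟩ => e ▸ hq⟩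
  | cons d rest ih =>
      show x ∈ iterA n rest (stepA n d cur) ↔ _
      rw [ih]
      constructor
      · rintro ⟨q', hq', hr⟩
        obtain ⟨q, hq, p, hp, rfl⟩ := (mem_stepA n d cur q').mp hq'
        exact ⟨q, hq, p, hp, hr⟩
      · rintro ⟨q, hq, p, hp, hr⟩
        exact ⟨_, (mem_stepA n d cur _).mpr ⟨q, hq, p, hp, rfl⟩, hr⟩

theorem aLoop_char (n : Int) (fs : List Int) (i : Nat) (cur : List (List Int)) :
    aLoop n fs i cur =
      match (List.range' 1 fs.length).find?
          (fun j => decide (([] : List Int) ∈ iterA n (fs.take j) cur)) with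
      | some j => ((i + j : Nat) : Int)
      | none => -1 := by
  induction fs generalizing i cur with
  | nil => simp [aLoop]
  | cons d rest ih =>
      by_cases h : ([] : List Int) ∈ stepA n d cur
      · have h1 : ([] : List Int) ∈ iterA n [d] cur := by
          simpa [iterA] using h
        rw [List.length_cons, List.range'_succ]
        simp [aLoop, h, h1, List.find?_cons]
      · have hc : PySem.Set.contains (stepA n d cur) ([] : List Int) = false := by
          rw [Bool.eq_false_iff]
          intro hcc
          exact h ((PySem.Set.contains_iff _ _).mp hcc)
        have h1 : ¬ (([] : List Int) ∈ iterA n ((d :: rest).take 1) cur) := by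
          simpa [iterA] using h
        rw [List.length_cons, List.range'_succ, aLoop]
        simp only [hc, Bool.false_eq_true, if_false, List.find?_cons, h1, decide_false,
          decide_eq_true_eq, if_neg h1]
        rw [ih (i + 1) (stepA n d cur)]
        have hmap2 : List.range' 2 rest.length = (List.range rest.length).map (2 + ·) :=
          List.range'_eq_map_range
        have hmap1 : List.range' 1 rest.length = (List.range rest.length).map (1 + ·) :=
          List.range'_eq_map_range
        have hfun : ((fun j => decide (([] : List Int) ∈ iterA n ((d :: rest).take j) cur)) ∘ (2 + ·)) =
            ((fun j => decide (([] : List Int) ∈ iterA n (rest.take j) (stepA n d cur))) ∘ (1 + ·)) := by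
          funext j
          have ht : (d :: rest).take (2 + j) = d :: rest.take (1 + j) := by
            have : 2 + j = (1 + j) + 1 := by omega
            rw [this, List.take_succ_cons]
          simp only [Function.comp_apply, ht]
          rfl
        rw [hmap2, hmap1, List.find?_map, List.find?_map, hfun]
        cases (List.range rest.length).find?
            ((fun j => decide (([] : List Int) ∈ iterA n (rest.take j) (stepA n d cur))) ∘ (1 + ·)) with
        | none => rfl
        | some j =>
            simp only [Option.map_some]
            push_cast
            ring

theorem bScan_char (n : Int) (ds weak : List Int) (ks : List Nat) :
    bScan n ds weak ks =
      match ks.find? (fun k => canB n (ds.take k) weak) with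
      | some k => (k : Int)
      | none => -1 := by
  induction ks with
  | nil => rfl
  | cons k rest ih =>
      cases h : canB n (ds.take k) weak with
      | true => simp [bScan, List.find?_cons, h]
      | false => simp [bScan, List.find?_cons, h, ih]

theorem canB_iff (n : Int) (fs pts : List Int) :
    canB n fs pts = true ↔ ∃ j, j ≤ fs.length ∧ reachE n (fs.take j) pts [] := by
  induction fs generalizing pts with
  | nil =>
      cases pts with
      | nil => simp [canB, reachE]
      | cons a l => simp [canB, reachE]
  | cons d rest ih =>
      cases pts with
      | nil =>
          simp only [canB, List.isEmpty_nil, if_true, true_iff]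
          exact ⟨0, by omega, rfl⟩
      | cons a l =>
          rw [canB]
          simp only [List.isEmpty_cons, if_false, Bool.false_eq_true, List.any_eq_true]
          constructor
          · rintro ⟨p, hp, hcan⟩
            obtain ⟨j, hj, hr⟩ := (ih _).mp hcan
            refine ⟨j + 1, by simpa using hj, ?_⟩
            rw [List.take_succ_cons, reachE]
            refine ⟨p, hp, ?_⟩
            have hfe : ((a :: l).filter (fun x => uncovered p x d n)) =
                ((a :: l).filter (fun x => isFar p x d n)) := by
              apply List.filter_congr
              intro x _
              exact uncovered_eq_isFar p x d n
            rw [hfe] at hr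
            exact hr
          · rintro ⟨j, hj, hr⟩
            cases j with
            | zero => simp [reachE] at hr
            | succ j' =>
                rw [List.take_succ_cons, reachE] at hr
                obtain ⟨p, hp, hr⟩ := hr
                refine ⟨p, hp, (ih _).mpr ⟨j', by simpa using hj, ?_⟩⟩
                have hfe : ((a :: l).filter (fun x => uncovered p x d n)) =
                    ((a :: l).filter (fun x => isFar p x d n)) := by
                  apply List.filter_congr
                  intro x _
                  exact uncovered_eq_isFar p x d n
                rw [hfe]
                exact hr

theorem find?_range'_eq_some_iff (s m j : Nat) (p : Nat → Bool) :
    (List.range' s m).find? p = some j ↔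
      s ≤ j ∧ j < s + m ∧ p j = true ∧ ∀ i, s ≤ i → i < j → p i = false := by
  induction m generalizing s with
  | zero =>
      simp only [List.range'_zero, List.find?_nil]
      constructor
      · intro h; cases h
      · rintro ⟨h1, h2, -⟩; omega
  | succ m ih =>
      rw [List.range'_succ]
      by_cases hs : p s = true
      · rw [List.find?_cons, hs]
        show some s = some j ↔ _
        constructor
        · intro he
          rw [Option.some_inj] at he
          subst he
          exact ⟨le_refl s, by omega, hs, fun i h1 h2 => by omega⟩
        · rintro ⟨h1, h2, h3, h4⟩
          rcases Nat.lt_or_ge s j with hlt | hge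
          · have := h4 s (le_refl s) hlt
            rw [this] at hs; cases hs
          · have : j = s := by omega
            rw [this]
      · have hps : p s = false := by simp_all
        rw [List.find?_cons, hps]
        show List.find? p (List.range' (s + 1) m) = some j ↔ _
        rw [ih]
        constructor
        · rintro ⟨h1, h2, h3, h4⟩
          refine ⟨by omega, by omega, h3, fun i hi1 hi2 => ?_⟩
          rcases Nat.lt_or_ge i (s + 1) with hl | hg
          · have : i = s := by omega
            rw [this]; exact hps
          · exact h4 i hg hi2
        · rintro ⟨h1, h2, h3, h4⟩
          have hjs : j ≠ s := by
            intro e; rw [e, hps] at h3; cases h3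
          exact ⟨by omega, by omega, h3, fun i hi1 hi2 => h4 i (by omega) hi2⟩

theorem find?_shadow (m : Nat) (p q : Nat → Bool)
    (h : ∀ k, 1 ≤ k → k ≤ m → (q k = true ↔ ∃ j, 1 ≤ j ∧ j ≤ k ∧ p j = true)) :
    (List.range' 1 m).find? q = (List.range' 1 m).find? p := by
  by_cases hex : ∃ j, 1 ≤ j ∧ j ≤ m ∧ p j = true
  · have hj0 := Nat.find_spec hex
    set j0 := Nat.find hex with hj0def
    have hmin : ∀ i, i < j0 → ¬(1 ≤ i ∧ i ≤ m ∧ p i = true) := fun i hi => Nat.find_min hex hi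
    obtain ⟨hj1, hjm, hjp⟩ := hj0
    have hfindp : (List.range' 1 m).find? p = some j0 := by
      rw [find?_range'_eq_some_iff]
      refine ⟨hj1, by omega, hjp, fun i hi1 hi2 => ?_⟩
      have hm := hmin i hi2
      by_cases hpi : p i = true
      · exact absurd ⟨hi1, by omega, hpi⟩ hm
      · simpa using hpi
    have hfindq : (List.range' 1 m).find? q = some j0 := by
      rw [find?_range'_eq_some_iff]
      refine ⟨hj1, by omega, (h j0 hj1 hjm).mpr ⟨j0, hj1, le_refl j0, hjp⟩, fun i hi1 hi2 => ?_⟩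
      by_cases hqi : q i = true
      · obtain ⟨j, hjj1, hjji, hjjp⟩ := (h i hi1 (by omega)).mp hqi
        exact absurd ⟨hjj1, by omega, hjjp⟩ (hmin j (by omega))
      · simpa using hqi
    rw [hfindp, hfindq]
  · have hp : (List.range' 1 m).find? p = none := by
      rw [List.find?_eq_none]
      intro x hx
      rw [List.mem_range'_1] at hx
      intro hpx
      exact hex ⟨x, hx.1, by omega, hpx⟩
    have hq : (List.range' 1 m).find? q = none := by
      rw [List.find?_eq_none]
      intro x hx
      rw [List.mem_range'_1] at hx
      intro hqx
      obtain ⟨j, h1, h2, h3⟩ := (h x hx.1 (by omega)).mp hqx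
      exact hex ⟨j, h1, by omega, h3⟩
    rw [hp, hq]

theorem aLoop_empty_frontier (n : Int) (fs : List Int) (i : Nat) :
    aLoop n fs i [] = -1 := by
  induction fs generalizing i with
  | nil => rfl
  | cons d rest ih => simp [aLoop, stepA, PySem.Set.contains, ih]

-- ===== VERDICT (by name: the statement is the Claim_ definition above) =====
theorem solution_spec : Claim_unchanged_solution := by
  intro n weak dist _ hpre
  unfold Spec_solution
  intro hnd
  by_cases hw : weak = []
  · exfalso
    by_cases hd : dist = []
    · exact hpre ⟨hw, hd⟩
    · exact hnd ⟨hw, hd⟩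
  · have hwe : weak.isEmpty = false := by
      cases weak with
      | nil => exact absurd rfl hw
      | cons a l => rfl
    rw [solution, solution_alt, hwe]
    simp only [Bool.false_eq_true, if_false]
    set ds := dist.reverse with hds
    rw [aLoop_char, bScan_char]
    have hshadow := find?_shadow ds.length
      (fun j => decide (([] : List Int) ∈ iterA n (ds.take j) [weak]))
      (fun k => canB n (ds.take k) weak)
      ?_
    · rw [hshadow]
      cases (List.range' 1 ds.length).find?
          (fun j => decide (([] : List Int) ∈ iterA n (ds.take j) [weak])) with
      | none => rfl
      | some j => simp
    · intro k hk1 hkm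
      simp only [canB_iff, decide_eq_true_eq]
      constructor
      · rintro ⟨j, hj, hr⟩
        rw [List.length_take] at hj
        rw [List.take_take] at hr
        have hminj : min j k = j := by omega
        rw [hminj] at hr
        cases j with
        | zero =>
            exfalso
            rw [List.take_zero, reachE] at hr
            exact hw hr.symm
        | succ j' =>
            refine ⟨j' + 1, by omega, by omega, ?_⟩
            rw [mem_iterA]
            exact ⟨weak, List.mem_singleton.mpr rfl, hr⟩
      · rintro ⟨j, hj1, hjk, hjp⟩
        rw [mem_iterA] at hjp
        obtain ⟨q, hq, hr⟩ := hjp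
        rw [List.mem_singleton] at hq
        subst hq
        refine ⟨j, ?_, ?_⟩
        · rw [List.length_take]; omega
        · rw [List.take_take]
          have : min j k = j := by omega
          rw [this]
          exact hr

theorem solution_changed : Claim_changed_solution := by
  unfold Claim_changed_solution; decide

theorem solution_tight : Claim_exact_solution := by
  rintro n weak dist _ _ ⟨hw, hd⟩
  subst hw
  have halt : solution_alt n [] dist = 0 := rfl
  rw [halt]
  have hsol : solution n [] dist = -1 := by
    rw [solution]
    cases hds : dist.reverse with
    | nil => exact absurd (by simpa using hds) hd
    | cons d rest =>
        rw [aLoop]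
        have hstep : stepA n d [([] : List Int)] = [] := rfl
        rw [hstep]
        simpa using aLoop_empty_frontier n rest 1
  rw [hsol]
  decide
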